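-- pv_equiv track=rewrite | github.com/Arsen1302/Code-copy-detector | TestData/solutions/problem_222_3.py | solution_222_3
-- ===== SOURCE A (Python) =====
-- from typing import List
--
-- def solution_222_3(A: List[int]) -> int:
--     l = 0
--     res = 0
--     for r, num in enumerate(A):
--         if r - l < 2:
--             continue
--         if num - A[r-1] == A[l+1] - A[l]:
--             res += r - l - 1
--         else:
--             l = r - 1
--     return res
-- ===== SOURCE B (Python) =====
-- def solution_222_3(A):
--     d = [y - x for x, y in zip(A, A[1:])]
--     res, k = 0, 1
--     for prev, cur in zip(d, d[1:]):
--         if cur == prev: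
--             k += 1
--         else:
--             res += k * (k - 1) // 2
--             k = 1
--     return res + k * (k - 1) // 2
-- ===== Notes on version B (the rewrite author's own statement) =====
-- stated objective: alternative
-- what changed: Replaces A's left-pointer windowing with per-step r-l-1 additions by a precomputed difference array scanned once with run lengths, adding the closed-form k*(k-1)//2 per maximal arithmetic run.
import Mathlib
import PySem

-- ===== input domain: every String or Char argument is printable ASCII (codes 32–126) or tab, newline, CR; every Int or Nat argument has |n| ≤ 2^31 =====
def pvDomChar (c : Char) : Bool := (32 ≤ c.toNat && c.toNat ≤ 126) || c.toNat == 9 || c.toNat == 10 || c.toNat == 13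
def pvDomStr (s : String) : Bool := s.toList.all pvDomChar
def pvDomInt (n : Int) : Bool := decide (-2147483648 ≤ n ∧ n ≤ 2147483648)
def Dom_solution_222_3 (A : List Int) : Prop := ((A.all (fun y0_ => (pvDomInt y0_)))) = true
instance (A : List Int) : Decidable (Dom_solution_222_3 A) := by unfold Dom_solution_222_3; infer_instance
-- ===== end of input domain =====

-- B is a different algorithm of the same cost: a difference array scanned once by runs, with a closed-form count per run.

-- ===== PORT A =====
-- loop body of A's `for r, num in enumerate(A)` with state (l, res)
def stepA (A : List Int) (st p : Int × Int) : Int × Int :=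
  if p.1 - st.1 < 2 then st
  else if p.2 - PySem.List.pyGetD A (p.1 - 1) 0
          = PySem.List.pyGetD A (st.1 + 1) 0 - PySem.List.pyGetD A st.1 0
    then (st.1, st.2 + (p.1 - st.1 - 1))
    else (p.1 - 1, st.2)

def solution_222_3 (A : List Int) : Int :=
  ((PySem.List.enumerate A 0).foldl (stepA A) (0, 0)).2

-- ===== PORT B =====
-- loop body of B's `for prev, cur in zip(d, d[1:])` with state (res, k)
def stepB (st pc : Int × Int) : Int × Int :=
  if pc.2 = pc.1 then (st.1, st.2 + 1)
  else (st.1 + PySem.Int.floordiv (st.2 * (st.2 - 1)) 2, 1)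

def solution_222_3_alt (A : List Int) : Int :=
  let d := (A.zip (A.drop 1)).map (fun p => p.2 - p.1)
  let st := (d.zip (d.drop 1)).foldl stepB (0, 1)
  st.1 + PySem.Int.floordiv (st.2 * (st.2 - 1)) 2

-- ===== PRECONDITION & SPEC =====
def Spec_solution_222_3 (A : List Int) (out : Int) : Prop := out = solution_222_3_alt A
instance (A : List Int) (out : Int) : Decidable (Spec_solution_222_3 A out) := by unfold Spec_solution_222_3; infer_instance

-- ===== CLAIM (what is proved, stated in full; the proofs are below) =====
def Claim_equal_solution_222_3 : Prop := ∀ (A : List Int), Dom_solution_222_3 A → Spec_solution_222_3 A (solution_222_3 A)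

-- ===== LEMMAS AND PROOFS =====

-- triangular count of slices contributed by a run of k equal differences
def T (k : Int) : Int := PySem.Int.floordiv (k * (k - 1)) 2

-- difference list of (a :: xs)
def diffsL : Int → List Int → List Int
  | _, [] => []
  | a, x :: xs => (x - a) :: diffsL x xs

-- A's loop rephrased over the remaining elements: a = previous element, δ = A[l+1]-A[l], k = r-1-l
def gA : List Int → Int → Int → Int → Int → Int
  | [], _, _, _, res => res
  | x :: xs, a, δ, k, res =>
    if x - a = δ then gA xs x δ (k + 1) (res + k) else gA xs x (x - a) 1 res

-- B's loop rephrased over the remaining differences: δ = previous difference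
def hB : List Int → Int → Int → Int → Int
  | [], _, k, res => res + T k
  | c :: ds, δ, k, res => if c = δ then hB ds c (k + 1) res else hB ds c 1 (res + T k)

lemma T_one : T 1 = 0 := by decide

lemma pyGetD_one_cons (x y : Int) (xs : List Int) :
    PySem.List.pyGetD (x :: y :: xs) 1 0 = y := by
  rw [show (1 : Int) = ((1 : Nat) : Int) by norm_num, PySem.List.pyGetD_natCast]
  rfl

lemma T_succ (k : Int) : T (k + 1) = T k + k := by
  unfold T
  have h : (k + 1) * (k + 1 - 1) = k * (k - 1) + k * 2 := by ring
  rw [h, PySem.Int.floordiv_eq_ediv_of_pos (by norm_num),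
      PySem.Int.floordiv_eq_ediv_of_pos (by norm_num)]
  exact Int.add_mul_ediv_right _ _ (by norm_num)

lemma zipmap_eq_diffsL : ∀ (a : Int) (xs : List Int),
    (((a :: xs).zip xs).map (fun p => p.2 - p.1)) = diffsL a xs := by
  intro a xs
  induction xs generalizing a with
  | nil => rfl
  | cons x t ih => simp [diffsL, ih x]

lemma foldB : ∀ (ds : List Int) (δ k res : Int),
    (((δ :: ds).zip ds).foldl stepB (res, k)).1
      + T ((((δ :: ds).zip ds).foldl stepB (res, k)).2)
    = hB ds δ k res := by
  intro ds
  induction ds with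
  | nil => intro δ k res; simp [hB]
  | cons c t ih =>
    intro δ k res
    simp only [List.zip_cons_cons, List.foldl_cons]
    by_cases hc : c = δ
    · have hs : stepB (res, k) (δ, c) = (res, k + 1) := by simp [stepB, hc]
      rw [hs, ih, hB, if_pos hc]
    · have hs : stepB (res, k) (δ, c) = (res + T k, 1) := by simp [stepB, hc, T]
      rw [hs, ih, hB, if_neg hc]

lemma gA_eq_hB : ∀ (xs : List Int) (a δ k res : Int),
    gA xs a δ k (res + T k) = hB (diffsL a xs) δ k res := by
  intro xs
  induction xs with
  | nil => intro a δ k res; rfl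
  | cons x t ih =>
    intro a δ k res
    simp only [diffsL, gA, hB]
    by_cases hc : x - a = δ
    · have : res + T k + k = res + T (k + 1) := by rw [T_succ]; ring
      simp [hc, this, ih]
    · rw [if_neg hc, if_neg hc]
      have h2 := ih x (x - a) 1 (res + T k)
      rw [T_one, add_zero] at h2
      exact h2

lemma foldA (A : List Int) : ∀ (xs : List Int) (j : Nat) (l res a : Int),
    A.drop j = xs → 2 ≤ j → 0 ≤ l → l + 2 ≤ (j : Int) →
    PySem.List.pyGetD A ((j : Int) - 1) 0 = a →
    ((PySem.List.enumerate xs (j : Int)).foldl (stepA A) (l, res)).2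
      = gA xs a (PySem.List.pyGetD A (l + 1) 0 - PySem.List.pyGetD A l 0)
           ((j : Int) - 1 - l) res := by
  intro xs
  induction xs with
  | nil => intro j l res a _ _ _ _ _; simp [PySem.List.enumerate_nil, gA]
  | cons x t ih =>
    intro j l res a hdrop hj hl hlj ha
    have hx : PySem.List.pyGetD A (j : Int) 0 = x := by
      have h0 : A[j]? = some x := by
        have h := congrArg (fun (L : List Int) => L[0]?) hdrop
        simpa [List.getElem?_drop] using h
      simp [PySem.List.pyGetD_natCast, List.getD, h0]
    have hdrop' : A.drop (j + 1) = t := by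
      have : A.drop (j + 1) = (A.drop j).drop 1 := by
        rw [List.drop_drop]
      simp [this, hdrop]
    rw [PySem.List.enumerate_cons, List.foldl_cons]
    have hguard : ¬ ((j : Int) - l < 2) := by omega
    simp only [stepA, hguard, if_false]
    by_cases hc : x - PySem.List.pyGetD A ((j : Int) - 1) 0
        = PySem.List.pyGetD A (l + 1) 0 - PySem.List.pyGetD A l 0
    · rw [if_pos hc]
      have hcast : (j : Int) + 1 = ((j + 1 : Nat) : Int) := by push_cast; ring
      rw [hcast, ih (j + 1) l (res + ((j : Int) - l - 1)) x hdrop' (by omega) hl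
        (by push_cast; omega) (by push_cast; simpa using hx)]
      have hca : x - a = PySem.List.pyGetD A (l + 1) 0 - PySem.List.pyGetD A l 0 := by
        rw [← ha]; exact hc
      simp only [gA, if_pos hca]
      have e1 : ((j + 1 : Nat) : Int) - 1 - l = ((j : Int) - 1 - l) + 1 := by push_cast; ring
      have e2 : (j : Int) - l - 1 = (j : Int) - 1 - l := by ring
      rw [e1, e2]
    · rw [if_neg hc]
      have hcast : (j : Int) + 1 = ((j + 1 : Nat) : Int) := by push_cast; ring
      rw [hcast, ih (j + 1) ((j : Int) - 1) res x hdrop' (by omega) (by omega)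
        (by push_cast; omega) (by push_cast; simpa using hx)]
      have hca : ¬ (x - a = PySem.List.pyGetD A (l + 1) 0 - PySem.List.pyGetD A l 0) := by
        rw [← ha]; exact hc
      simp only [gA, if_neg hca]
      have e1 : (j : Int) - 1 + 1 = (j : Int) := by ring
      have e2 : ((j + 1 : Nat) : Int) - 1 - ((j : Int) - 1) = 1 := by push_cast; ring
      rw [e1, e2, hx, ha]

-- ===== VERDICT (by name: the statement is the Claim_ definition above) =====
theorem solution_222_3_spec : Claim_equal_solution_222_3 := by
  intro A _
  unfold Spec_solution_222_3
  match A with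
  | [] => decide
  | [a] =>
    simp [solution_222_3, solution_222_3_alt, stepA,
      PySem.List.enumerate_cons, PySem.List.enumerate_nil, PySem.Int.floordiv]
  | a :: b :: t =>
    have hA : solution_222_3 (a :: b :: t)
        = gA t b (b - a) 1 0 := by
      unfold solution_222_3
      rw [PySem.List.enumerate_cons, PySem.List.enumerate_cons, List.foldl_cons,
        List.foldl_cons]
      have s1 : stepA (a :: b :: t) (0, 0) (0, a) = (0, 0) := by
        simp [stepA]
      have s2 : stepA (a :: b :: t) (0, 0) (0 + 1, b) = (0, 0) := by
        simp [stepA]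
      rw [s1, s2]
      have h2 : (0 : Int) + 1 + 1 = ((2 : Nat) : Int) := by norm_num
      rw [h2, foldA (a :: b :: t) t 2 0 0 b rfl (by norm_num) (by norm_num)
        (by norm_num) (by norm_num [pyGetD_one_cons])]
      rw [show PySem.List.pyGetD (a :: b :: t) (0 + 1) 0 = b by
            norm_num [pyGetD_one_cons],
          PySem.List.pyGetD_zero_cons,
          show ((2 : Nat) : Int) - 1 - 0 = 1 by norm_num]
    have hB' : solution_222_3_alt (a :: b :: t)
        = hB (diffsL b t) (b - a) 1 0 := by
      unfold solution_222_3_alt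
      have hd : ((a :: b :: t).zip ((a :: b :: t).drop 1)).map (fun p => p.2 - p.1)
          = (b - a) :: diffsL b t := by
        simpa [diffsL] using zipmap_eq_diffsL a (b :: t)
      simp only [hd]
      have hdrop : ((b - a) :: diffsL b t).drop 1 = diffsL b t := rfl
      rw [hdrop]
      exact foldB (diffsL b t) (b - a) 1 0
    rw [hA, hB']
    have h3 := gA_eq_hB t b (b - a) 1 0
    rw [T_one, add_zero] at h3
    exact h3
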